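-- pv_equiv track=rewrite | github.com/tomerkedem/bookforge | src/pipeline/organize.py | wrap_hebrew_tables_with_rtl
-- ===== SOURCE A (Python) =====
-- def wrap_hebrew_tables_with_rtl(content: str) -> str:
--     """
--     Wrap markdown tables in Hebrew content with RTL direction divs.
--
--     Detects markdown tables (lines starting/ending with |) and wraps them
--     with <div dir="rtl"> ... </div> for proper right-to-left display.
--
--     Args:
--         content: Markdown content potentially containing tables
--
--     Returns:
--         Content with tables wrapped in RTL divs
--     """
--     lines = content.split('\n')
--     result = []
--     in_table = False
--     table_lines = []
--
--     for line in lines: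
--         stripped = line.strip()
--         is_table_line = stripped.startswith('|') and stripped.endswith('|')
--
--         if is_table_line and not in_table:
--             # Start of a new table
--             in_table = True
--             table_lines = [line]
--         elif is_table_line and in_table:
--             # Continuation of current table
--             table_lines.append(line)
--         elif in_table and not is_table_line:
--             # End of table - wrap it with RTL div
--             result.append('<div dir="rtl">')
--             result.append('')
--             result.extend(table_lines)
--             result.append('')
--             result.append('</div>')
--             result.append(line)  # Add the non-table line
--             in_table = False
--             table_lines = []
--         else:
--             # Regular line, not in table
--             result.append(line)
--
--     # Handle case where file ends with a table
--     if in_table and table_lines: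
--         result.append('<div dir="rtl">')
--         result.append('')
--         result.extend(table_lines)
--         result.append('')
--         result.append('</div>')
--
--     return '\n'.join(result)
-- ===== SOURCE B (Python) =====
-- def wrap_hebrew_tables_with_rtl(content: str) -> str:
--     """Wrap markdown tables with RTL divs by grouping maximal runs of table lines."""
--     def is_table(line):
--         s = line.strip()
--         return s.startswith('|') and s.endswith('|')
--
--     lines = content.split('\n')
--     out = []
--     i = 0
--     n = len(lines)
--     while i < n:
--         if is_table(lines[i]):
--             j = i
--             while j < n and is_table(lines[j]):
--                 j += 1
--             out += ['<div dir="rtl">', ''] + lines[i:j] + ['', '</div>']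
--             i = j
--         else:
--             out.append(lines[i])
--             i += 1
--     return '\n'.join(out)
-- ===== Notes on version B (the rewrite author's own statement) =====
-- stated objective: simpler
-- what changed: Replaced the in_table/table_lines state machine with end-of-file flush by index-based grouping of maximal consecutive runs of table lines, wrapping each run as it is found.
import Mathlib
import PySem

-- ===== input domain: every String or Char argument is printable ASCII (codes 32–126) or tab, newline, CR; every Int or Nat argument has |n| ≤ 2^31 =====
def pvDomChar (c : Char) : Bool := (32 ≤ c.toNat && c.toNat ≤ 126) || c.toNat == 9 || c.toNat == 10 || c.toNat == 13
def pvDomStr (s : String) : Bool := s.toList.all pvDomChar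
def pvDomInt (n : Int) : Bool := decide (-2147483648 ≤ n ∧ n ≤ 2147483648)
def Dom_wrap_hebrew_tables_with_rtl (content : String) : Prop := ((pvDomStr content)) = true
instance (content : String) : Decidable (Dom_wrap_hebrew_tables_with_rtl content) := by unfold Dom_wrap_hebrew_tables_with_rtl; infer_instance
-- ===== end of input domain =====

-- B replaces A's in_table/table_lines state machine (with end-of-file flush) by grouping
-- maximal consecutive runs of table lines and wrapping each run as it is found (simpler).

-- shared predicate: line.strip().startswith('|') and line.strip().endswith('|')
def pvIsTable (line : String) : Bool :=
  let s := PySem.Str.strip line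
  PySem.Str.startswith s "|" && PySem.Str.endswith s "|"

-- ===== PORT A =====
-- the wrapped block appended when a table ends
def pvWrap (tl : List String) : List String :=
  "<div dir=\"rtl\">" :: "" :: tl ++ ["", "</div>"]

-- A's loop: state (result, in_table, table_lines); final flush when in_table and table_lines ≠ []
def pvLoopA : List String → List String → Bool → List String → List String
  | [], res, inT, tl => if inT && !tl.isEmpty then res ++ pvWrap tl else res
  | l :: ls, res, inT, tl =>
    let it := pvIsTable l
    if it && !inT then pvLoopA ls res true [l]
    else if it && inT then pvLoopA ls res inT (tl ++ [l])
    else if inT && !it then pvLoopA ls (res ++ pvWrap tl ++ [l]) false []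
    else pvLoopA ls (res ++ [l]) inT tl

def wrap_hebrew_tables_with_rtl (content : String) : String :=
  PySem.Str.join "\n" (pvLoopA ((PySem.Str.split? content "\n").getD []) [] false [])

-- ===== PORT B =====
-- B's loop: on a table line, take the maximal run of table lines and wrap it; else copy the line
def pvLoopB : List String → List String
  | [] => []
  | l :: ls =>
    if pvIsTable l then
      "<div dir=\"rtl\">" :: "" :: (l :: ls.takeWhile pvIsTable) ++
        ["", "</div>"] ++ pvLoopB (ls.dropWhile pvIsTable)
    else l :: pvLoopB ls
  termination_by ls => ls.length
  decreasing_by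
  · exact Nat.lt_succ_of_le (List.length_dropWhile_le pvIsTable ls)
  · exact Nat.lt_succ_self _

def wrap_hebrew_tables_with_rtl_alt (content : String) : String :=
  PySem.Str.join "\n" (pvLoopB ((PySem.Str.split? content "\n").getD []))

-- ===== PRECONDITION & SPEC =====
def Spec_wrap_hebrew_tables_with_rtl (content : String) (out : String) : Prop := out = wrap_hebrew_tables_with_rtl_alt content
instance (content : String) (out : String) : Decidable (Spec_wrap_hebrew_tables_with_rtl content out) := by unfold Spec_wrap_hebrew_tables_with_rtl; infer_instance

-- ===== CLAIM (what is proved, stated in full; the proofs are below) =====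
def Claim_equal_wrap_hebrew_tables_with_rtl : Prop := ∀ (content : String), Dom_wrap_hebrew_tables_with_rtl content → Spec_wrap_hebrew_tables_with_rtl content (wrap_hebrew_tables_with_rtl content)

-- ===== LEMMAS AND PROOFS =====

theorem pvLoopB_nil : pvLoopB [] = [] := by rw [pvLoopB]

theorem pvLoopB_cons (l : String) (ls : List String) :
    pvLoopB (l :: ls) =
      if pvIsTable l then
        "<div dir=\"rtl\">" :: "" :: (l :: ls.takeWhile pvIsTable) ++
          ["", "</div>"] ++ pvLoopB (ls.dropWhile pvIsTable)
      else l :: pvLoopB ls := by rw [pvLoopB]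

-- the two loops agree: in state (res,false,[]) A behaves like B; in state (res,true,tl≠[])
-- A finishes the current run exactly as B's wrapped maximal run that began with tl
theorem pvLoop_eq (ls : List String) :
    (∀ res, pvLoopA ls res false [] = res ++ pvLoopB ls) ∧
    (∀ res tl, tl ≠ [] → pvLoopA ls res true tl =
      res ++ "<div dir=\"rtl\">" :: "" :: (tl ++ ls.takeWhile pvIsTable) ++
        ["", "</div>"] ++ pvLoopB (ls.dropWhile pvIsTable)) := by
  induction ls with
  | nil =>
    constructor
    · intro res; simp [pvLoopA, pvLoopB]
    · intro res tl htl
      simp [pvLoopA, pvWrap, htl, pvLoopB_nil]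
  | cons l ls ih =>
    obtain ⟨ih1, ih2⟩ := ih
    constructor
    · intro res
      by_cases h : pvIsTable l = true
      · rw [pvLoopA]
        simp only [h]
        rw [ih2 res [l] (by simp), pvLoopB_cons]
        simp [h]
      · rw [pvLoopA]
        simp only [h]
        rw [ih1 (res ++ [l]), pvLoopB_cons]
        simp [h]
    · intro res tl htl
      by_cases h : pvIsTable l = true
      · rw [pvLoopA]
        simp only [h]
        rw [ih2 res (tl ++ [l]) (by simp)]
        simp [h]
      · rw [pvLoopA]
        simp only [h]
        rw [ih1 (res ++ pvWrap tl ++ [l])]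
        simp [h, pvWrap, pvLoopB_cons]

-- ===== VERDICT (by name: the statement is the Claim_ definition above) =====
theorem wrap_hebrew_tables_with_rtl_spec : Claim_equal_wrap_hebrew_tables_with_rtl := by
  intro content _
  unfold Spec_wrap_hebrew_tables_with_rtl wrap_hebrew_tables_with_rtl wrap_hebrew_tables_with_rtl_alt
  rw [(pvLoop_eq _).1 []]
  simp
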